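-- pv_equiv track=rewrite | github.com/ckdals4600/BaekJoon | 프로그래머스/2/76502. 괄호 회전하기/괄호 회전하기.py | first_chk
-- ===== SOURCE A (Python) =====
-- def first_chk(chk):
--     l_n = 0
--     m_n = 0
--     s_n = 0
--
--     for n in chk:
--         if n == "[":
--             l_n += 1
--         elif n == "]":
--             l_n -= 1
--         elif n == "{":
--             m_n += 1
--         elif n == "}":
--             m_n -= 1
--         elif n == "(":
--             s_n += 1
--         elif n == ")":
--             s_n -= 1
--
--     if s_n != 0 or m_n != 0 or l_n != 0:
--         return False
--
--     return True
-- ===== SOURCE B (Python) =====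
-- def first_chk(chk):
--     return (chk.count('[') == chk.count(']')
--             and chk.count('{') == chk.count('}')
--             and chk.count('(') == chk.count(')'))
-- ===== Notes on version B (the rewrite author's own statement) =====
-- stated objective: simpler
-- what changed: Replaces the single loop maintaining three running balances with three independent paired str.count comparisons per bracket type.
import Mathlib
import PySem

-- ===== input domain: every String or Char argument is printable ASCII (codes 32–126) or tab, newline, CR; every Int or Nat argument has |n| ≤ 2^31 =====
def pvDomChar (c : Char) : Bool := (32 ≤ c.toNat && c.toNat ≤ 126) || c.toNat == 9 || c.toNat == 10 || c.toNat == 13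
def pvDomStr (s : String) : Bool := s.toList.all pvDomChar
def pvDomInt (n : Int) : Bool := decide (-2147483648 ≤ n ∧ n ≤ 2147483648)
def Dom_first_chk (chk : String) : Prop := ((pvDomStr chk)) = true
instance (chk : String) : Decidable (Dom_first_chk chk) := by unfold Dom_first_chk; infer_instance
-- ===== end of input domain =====

-- B replaces A's single three-counter loop with three paired str.count comparisons (objective: simpler).

-- ===== PORT A =====
-- one pass, three running balances, branch order as in the Python
def first_chk (chk : String) : Bool :=
  let st := chk.toList.foldl
    (fun (acc : Int × Int × Int) n =>
      let (l_n, m_n, s_n) := acc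
      if n == '[' then (l_n + 1, m_n, s_n)
      else if n == ']' then (l_n - 1, m_n, s_n)
      else if n == '{' then (l_n, m_n + 1, s_n)
      else if n == '}' then (l_n, m_n - 1, s_n)
      else if n == '(' then (l_n, m_n, s_n + 1)
      else if n == ')' then (l_n, m_n, s_n - 1)
      else (l_n, m_n, s_n))
    (0, 0, 0)
  if st.2.2 ≠ 0 ∨ st.2.1 ≠ 0 ∨ st.1 ≠ 0 then false else true

-- ===== PORT B =====
def first_chk_alt (chk : String) : Bool :=
  PySem.Str.count chk "[" == PySem.Str.count chk "]"
  && PySem.Str.count chk "{" == PySem.Str.count chk "}"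
  && PySem.Str.count chk "(" == PySem.Str.count chk ")"

-- ===== PRECONDITION & SPEC =====
def Spec_first_chk (chk : String) (out : Bool) : Prop := out = first_chk_alt chk
instance (chk : String) (out : Bool) : Decidable (Spec_first_chk chk out) := by unfold Spec_first_chk; infer_instance

-- ===== CLAIM (what is proved, stated in full; the proofs are below) =====
def Claim_equal_first_chk : Prop := ∀ (chk : String), Dom_first_chk chk → Spec_first_chk chk (first_chk chk)

-- ===== LEMMAS AND PROOFS =====

-- Chars.count with a single-character needle is List.count (no overlap possible)
lemma chars_count_go_singleton (c : Char) (l : List Char) (fuel acc : Nat)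
    (h : l.length ≤ fuel) :
    PySem.Chars.count.go [c] fuel l acc = acc + l.count c := by
  induction fuel generalizing l acc with
  | zero =>
    have : l = [] := by cases l <;> simp_all
    subst this; simp [PySem.Chars.count.go]
  | succ fuel ih =>
    cases l with
    | nil => simp [PySem.Chars.count.go]
    | cons hd t =>
      simp only [PySem.Chars.count.go]
      by_cases hc : hd = c
      · subst hc
        simp only [List.isPrefixOf, BEq.rfl, Bool.true_and, if_pos]
        rw [ih _ _ (by simpa using Nat.le_of_succ_le_succ (by simpa using h))]
        simp
        omega
      · have : ([c].isPrefixOf (hd :: t)) = false := by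
          simp [List.isPrefixOf]
          exact fun hh => (hc hh.symm).elim
        rw [this]
        simp only [Bool.false_eq_true, if_false]
        rw [ih _ _ (by simpa using Nat.le_of_succ_le_succ (by simpa using h))]
        simp [hc]

lemma str_count_singleton (chk s : String) (c : Char) (hs : s.toList = [c]) :
    PySem.Str.count chk s = chk.toList.count c := by
  show PySem.Chars.count chk.toList s.toList = _
  rw [hs]
  unfold PySem.Chars.count
  simp only [List.isEmpty_cons, Bool.false_eq_true, if_false]
  simpa using chars_count_go_singleton c chk.toList chk.toList.length 0 le_rfl

-- loop invariant for A's fold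
lemma foldA_inv (l : List Char) (a b c : Int) :
    l.foldl
    (fun (acc : Int × Int × Int) n =>
      let (l_n, m_n, s_n) := acc
      if n == '[' then (l_n + 1, m_n, s_n)
      else if n == ']' then (l_n - 1, m_n, s_n)
      else if n == '{' then (l_n, m_n + 1, s_n)
      else if n == '}' then (l_n, m_n - 1, s_n)
      else if n == '(' then (l_n, m_n, s_n + 1)
      else if n == ')' then (l_n, m_n, s_n - 1)
      else (l_n, m_n, s_n))
    (a, b, c)
    = (a + l.count '[' - l.count ']',
       b + l.count '{' - l.count '}',
       c + l.count '(' - l.count ')') := by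
  induction l generalizing a b c with
  | nil => simp
  | cons hd t ih =>
    simp only [List.foldl_cons, List.count_cons]
    by_cases h1 : hd = '['
    · subst h1
      rw [if_pos (by decide : ((('[':Char) == '[') = true)), ih]
      simp only [Prod.mk.injEq]
      refine ⟨by simp; omega, by simp, by simp⟩
    · rw [if_neg (by simp [h1])]
      by_cases h2 : hd = ']'
      · subst h2
        rw [if_pos (by decide : (((']':Char) == ']') = true)), ih]
        simp only [Prod.mk.injEq]
        refine ⟨by simp; omega, by simp, by simp⟩
      · rw [if_neg (by simp [h2])]
        by_cases h3 : hd = '{'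
        · subst h3
          rw [if_pos (by decide : ((('{':Char) == '{') = true)), ih]
          simp only [Prod.mk.injEq]
          refine ⟨by simp, by simp; omega, by simp⟩
        · rw [if_neg (by simp [h3])]
          by_cases h4 : hd = '}'
          · subst h4
            rw [if_pos (by decide : ((('}':Char) == '}') = true)), ih]
            simp only [Prod.mk.injEq]
            refine ⟨by simp, by simp; omega, by simp⟩
          · rw [if_neg (by simp [h4])]
            by_cases h5 : hd = '('
            · subst h5
              rw [if_pos (by decide : ((('(':Char) == '(') = true)), ih]
              simp only [Prod.mk.injEq]
              refine ⟨by simp, by simp, by simp; omega⟩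
            · rw [if_neg (by simp [h5])]
              by_cases h6 : hd = ')'
              · subst h6
                rw [if_pos (by decide : (((')':Char) == ')') = true)), ih]
                simp only [Prod.mk.injEq]
                refine ⟨by simp, by simp, by simp; omega⟩
              · rw [if_neg (by simp [h6]), ih]
                simp only [Prod.mk.injEq]
                refine ⟨by simp [h1, h2], by simp [h3, h4], by simp [h5, h6]⟩

-- ===== VERDICT (by name: the statement is the Claim_ definition above) =====
theorem first_chk_spec : Claim_equal_first_chk := by
  intro chk _
  unfold Spec_first_chk first_chk first_chk_alt
  rw [foldA_inv]
  rw [str_count_singleton chk "[" '[' (by decide), str_count_singleton chk "]" ']' (by decide),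
      str_count_singleton chk "{" '{' (by decide), str_count_singleton chk "}" '}' (by decide),
      str_count_singleton chk "(" '(' (by decide), str_count_singleton chk ")" ')' (by decide)]
  set a1 := chk.toList.count '[' with ha1
  set a2 := chk.toList.count ']' with ha2
  set b1 := chk.toList.count '{' with hb1
  set b2 := chk.toList.count '}' with hb2
  set c1 := chk.toList.count '(' with hc1
  set c2 := chk.toList.count ')' with hc2
  dsimp only
  split_ifs with hif
  · symm
    rcases hif with h | h | h
    · have hne : ¬ (c1 = c2) := by simp at h ⊢; omega
      simp [hne]
    · have hne : ¬ (b1 = b2) := by simp at h ⊢; omega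
      simp [hne]
    · have hne : ¬ (a1 = a2) := by simp at h ⊢; omega
      simp [hne]
  · simp only [not_or, ne_eq, not_not] at hif
    obtain ⟨h1, h2, h3⟩ := hif
    have e1 : a1 = a2 := by simp at h3; omega
    have e2 : b1 = b2 := by simp at h2; omega
    have e3 : c1 = c2 := by simp at h1; omega
    simp [e1, e2, e3]
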